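-- pv_equiv track=rewrite | github.com/ish-gupta/ml-robot | training/DatasetGenerator.py | stripleftchars
-- ===== SOURCE A (Python) =====
-- def stripleftchars(s):
--     # Find the last occurrence of a numeric character in the string
--     numeric_chars = ''
--     for i in range(len(s) - 1, -1, -1):
--         if s[i].isnumeric():
--             numeric_chars = s[i] + numeric_chars
--         elif s[i:].startswith('_'):
--             return numeric_chars if numeric_chars else '0'  # Return '0' if numeric_chars is empty
--     return '0'  # Return '0' if no numeric characters are found
-- ===== SOURCE B (Python) =====
-- def stripleftchars(s):
--     # Single forward pass: reset the digit accumulator at each underscore;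
--     # the result is meaningful only if an underscore was seen at all.
--     seen_underscore = False
--     digits = ''
--     for c in s:
--         if c == '_':
--             seen_underscore = True
--             digits = ''
--         elif c.isnumeric():
--             digits += c
--     return digits if seen_underscore and digits else '0'
-- ===== Notes on version B (the rewrite author's own statement) =====
-- stated objective: alternative
-- what changed: Replaces A's backward index scan with early return at the first underscore by a single forward pass that resets a digit accumulator at every underscore and keeps a seen-underscore flag.
import Mathlib
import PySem

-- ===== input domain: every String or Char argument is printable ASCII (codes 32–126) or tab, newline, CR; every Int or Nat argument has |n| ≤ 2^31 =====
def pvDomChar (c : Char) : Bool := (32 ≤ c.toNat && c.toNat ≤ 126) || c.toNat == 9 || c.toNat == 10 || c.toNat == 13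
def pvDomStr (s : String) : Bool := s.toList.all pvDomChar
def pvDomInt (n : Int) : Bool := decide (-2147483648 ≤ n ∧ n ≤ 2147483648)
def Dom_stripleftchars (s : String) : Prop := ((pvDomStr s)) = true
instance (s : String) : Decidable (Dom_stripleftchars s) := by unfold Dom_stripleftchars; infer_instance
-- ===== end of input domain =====

-- B replaces A's backward scan (early return at the first underscore met from the right)
-- by one forward pass that resets a digit accumulator at each underscore: an alternative
-- decomposition, same cost; equivalence of return values is proved on Dom.

-- ===== PORT A =====
-- A scans i = len(s)-1 .. 0; we transcribe this as structural recursion over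
-- s.toList.reverse, carrying `suffix` = the already-consumed forward suffix s[i+1:]
-- (so `c :: suffix` is s[i:], used for the startswith('_') test) and `numeric` =
-- numeric_chars as a char list.  On the ASCII domain str.isnumeric() coincides with
-- str.isdigit(), ported as PySem.Chars.isdigit (exact there).
def stripleftcharsLoop : List Char → List Char → List Char → String
  | [], _, _ => "0"                       -- loop finished: return '0'
  | c :: rest, suffix, numeric =>
      if PySem.Chars.isdigit c then       -- s[i].isnumeric()
        stripleftcharsLoop rest (c :: suffix) (c :: numeric)
      else if PySem.Chars.startswith (c :: suffix) ['_'] then   -- s[i:].startswith('_')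
        (if numeric ≠ [] then String.mk numeric else "0")
      else
        stripleftcharsLoop rest (c :: suffix) numeric

def stripleftchars (s : String) : String :=
  stripleftcharsLoop s.toList.reverse [] []

-- ===== PORT B =====
-- Source B: one forward pass; reset `digits` at '_', append numeric chars, remember
-- whether an underscore was ever seen.
def stripleftcharsAltLoop : List Char → Bool → List Char → Bool × List Char
  | [], seen, digits => (seen, digits)
  | c :: rest, seen, digits =>
      if c = '_' then stripleftcharsAltLoop rest true []
      else if PySem.Chars.isdigit c then stripleftcharsAltLoop rest seen (digits ++ [c])
      else stripleftcharsAltLoop rest seen digits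

def stripleftchars_alt (s : String) : String :=
  let r := stripleftcharsAltLoop s.toList false []
  if r.1 && !r.2.isEmpty then String.mk r.2 else "0"

-- ===== PRECONDITION & SPEC =====
def Spec_stripleftchars (s : String) (out : String) : Prop := out = stripleftchars_alt s
instance (s : String) (out : String) : Decidable (Spec_stripleftchars s out) := by unfold Spec_stripleftchars; infer_instance

-- ===== CLAIM (what is proved, stated in full; the proofs are below) =====
def Claim_equal_stripleftchars : Prop := ∀ (s : String), Dom_stripleftchars s → Spec_stripleftchars s (stripleftchars s)

-- ===== LEMMAS AND PROOFS =====

-- The (forward-order) characters strictly after the LAST underscore of l, if any underscore exists.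
def tailAfterUnderscore : List Char → Option (List Char)
  | [] => none
  | c :: rest =>
      match tailAfterUnderscore rest with
      | some t => some t
      | none => if c = '_' then some rest else none

theorem tailAfter_append_singleton (l : List Char) (c : Char) :
    tailAfterUnderscore (l ++ [c]) =
      if c = '_' then some [] else (tailAfterUnderscore l).map (· ++ [c]) := by
  induction l with
  | nil =>
      by_cases h : c = '_' <;> simp [tailAfterUnderscore, h]
  | cons r rest ih =>
      by_cases h : c = '_'
      · simp only [h] at ih ⊢
        simp [tailAfterUnderscore, ih]
      · simp only [if_neg h] at ih ⊢
        cases hr : tailAfterUnderscore rest with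
        | some t => simp [tailAfterUnderscore, ih, hr]
        | none =>
            by_cases hru : r = '_' <;>
              simp [tailAfterUnderscore, ih, hr, hru]

theorem startswith_underscore (c : Char) (suf : List Char) :
    PySem.Chars.startswith (c :: suf) ['_'] = (c = '_' : Bool) := by
  by_cases h : c = '_'
  · subst h; simp [PySem.Chars.startswith_iff]
  · simp only [decide_eq_false h]
    rw [Bool.eq_false_iff]
    intro hsw
    rw [PySem.Chars.startswith_iff] at hsw
    rcases hsw with ⟨t, ht⟩
    simp at ht
    exact h ht.1.symm

-- A's loop, characterised via tailAfterUnderscore (reverse induction on the forward string).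
theorem loopA_spec (cs : List Char) : ∀ (suf num : List Char),
    stripleftcharsLoop cs.reverse suf num =
      match tailAfterUnderscore cs with
      | some t => (if t.filter PySem.Chars.isdigit ++ num ≠ [] then
                     String.mk (t.filter PySem.Chars.isdigit ++ num) else "0")
      | none => "0" := by
  induction cs using List.reverseRecOn with
  | nil => intro suf num; simp [stripleftcharsLoop, tailAfterUnderscore]
  | append_singleton cs c ih =>
      intro suf num
      rw [List.reverse_append, tailAfter_append_singleton]
      simp only [List.reverse_singleton, List.singleton_append]
      by_cases hd : PySem.Chars.isdigit c
      · have hne : ¬ (c = '_') := by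
          intro h; subst h; simp [PySem.Chars.isdigit] at hd
        rw [stripleftcharsLoop, if_pos hd, ih]
        cases ht : tailAfterUnderscore cs with
        | none => simp [hne]
        | some t => simp [hne, List.filter_append, List.filter, hd]
      · rw [stripleftcharsLoop, if_neg hd, startswith_underscore]
        by_cases hu : c = '_'
        · simp only [hu, decide_true, if_pos]
          split_ifs with h1 h2 h2 <;> simp_all
        · simp only [decide_eq_false hu, Bool.false_eq_true, if_false, if_neg hu, ih]
          cases ht : tailAfterUnderscore cs with
          | none => simp
          | some t => simp [List.filter_append, List.filter, hd]

-- B's loop, characterised via tailAfterUnderscore (forward induction).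
theorem loopB_spec (cs : List Char) : ∀ (seen : Bool) (digits : List Char),
    stripleftcharsAltLoop cs seen digits =
      match tailAfterUnderscore cs with
      | some t => (true, t.filter PySem.Chars.isdigit)
      | none => (seen, digits ++ cs.filter PySem.Chars.isdigit) := by
  induction cs with
  | nil => intro seen digits; simp [stripleftcharsAltLoop, tailAfterUnderscore]
  | cons c rest ih =>
      intro seen digits
      by_cases hu : c = '_'
      · subst hu
        rw [stripleftcharsAltLoop, if_pos rfl, ih]
        cases ht : tailAfterUnderscore rest with
        | some t => simp [tailAfterUnderscore, ht]
        | none => simp [tailAfterUnderscore, ht]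
      · by_cases hd : PySem.Chars.isdigit c
        · rw [stripleftcharsAltLoop, if_neg hu, if_pos hd, ih]
          cases ht : tailAfterUnderscore rest with
          | some t => simp [tailAfterUnderscore, ht]
          | none => simp [tailAfterUnderscore, ht, hu, List.filter, hd]
        · rw [stripleftcharsAltLoop, if_neg hu, if_neg hd, ih]
          cases ht : tailAfterUnderscore rest with
          | some t => simp [tailAfterUnderscore, ht]
          | none => simp [tailAfterUnderscore, ht, hu, List.filter, hd]

-- ===== VERDICT (by name: the statement is the Claim_ definition above) =====
theorem stripleftchars_spec : Claim_equal_stripleftchars := by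
  intro s _
  unfold Spec_stripleftchars stripleftchars stripleftchars_alt
  rw [loopA_spec, loopB_spec]
  cases ht : tailAfterUnderscore s.toList with
  | none => simp
  | some t =>
      by_cases h : t.filter PySem.Chars.isdigit = [] <;> simp [h]
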